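-- pv_equiv track=rewrite | github.com/ARCAlhau80/LotoScope | benchmark_quadrantes.py | calcular_score_invertida
-- ===== SOURCE A (Python) =====
-- from collections import Counter
--
-- def calcular_score_invertida(dados_historicos):
--     """
--     Calcula score INVERTIDA v3.0 para cada número 1-25.
--     Retorna dict {numero: score} — score alto = candidato a exclusão.
--     """
--     def freq_janela(tamanho):
--         freq = Counter()
--         for r in dados_historicos[:min(tamanho, len(dados_historicos))]:
--             freq.update(r['numeros'])
--         return {n: freq.get(n, 0) / min(tamanho, len(dados_historicos)) * 100 for n in range(1, 26)}
--
--     def contar_consecutivos(n):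
--         count = 0
--         for r in dados_historicos[:15]:
--             if n in r['numeros']:
--                 count += 1
--             else:
--                 break
--         return count
--
--     freq_5 = freq_janela(5)
--     freq_50 = freq_janela(50)
--     FREQ_ESPERADA = 60
--
--     scores = {}
--     for n in range(1, 26):
--         fc = freq_5[n]
--         fl = freq_50[n]
--         indice_debito = fl - fc
--         consecutivos = contar_consecutivos(n)
--         apareceu_recente = any(n in r['numeros'] for r in dados_historicos[:3])
--
--         score = 0
--         if consecutivos >= 10:
--             score -= 5
--         elif consecutivos >= 5:
--             score += 6
--         elif consecutivos >= 4:
--             score += 5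
--         elif consecutivos >= 3 and fc >= 80:
--             score += 4
--         elif consecutivos >= 3:
--             score += 3
--         elif fc >= 100:
--             score += 4
--         elif fc >= 80 and apareceu_recente:
--             score += 3
--         elif indice_debito < -35:
--             score += 2
--         elif indice_debito < -25:
--             score += 1
--         elif indice_debito >= 0:
--             score -= 2
--         else:
--             score -= 1
--
--         if fc > FREQ_ESPERADA + 20:
--             score += 1
--
--         scores[n] = score
--     return scores
-- ===== SOURCE B (Python) =====
-- def calcular_score_invertida(dados_historicos):
--     """Single forward sweep over the first 50 records building all statistics at
--     once (frequency tables, recent-set, per-number consecutive streaks), then one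
--     scoring pass in exact integer arithmetic (cross-multiplication, no floats)."""
--     L = len(dados_historicos)
--     m5 = min(5, L)
--     m50 = min(50, L)
--     f5 = {}
--     f50 = {}
--     recent = set()
--     streaks = [(0, True)] * 25  # (streak length, still consecutive) for numbers 1..25
--     for i, r in enumerate(dados_historicos[:50]):
--         nums = r['numeros']
--         if i < 5:
--             for x in nums:
--                 f5[x] = f5.get(x, 0) + 1
--         for x in nums:
--             f50[x] = f50.get(x, 0) + 1
--         if i < 3:
--             recent.update(nums)
--         if i < 15:
--             streaks = [((c + 1, True) if j + 1 in nums else (c, False)) if a else (c, a)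
--                        for j, (c, a) in enumerate(streaks)]
--     scores = {}
--     for n in range(1, 26):
--         c5 = f5.get(n, 0)    # fc  = 100*c5/m5
--         c50 = f50.get(n, 0)  # fl  = 100*c50/m50
--         k = streaks[n - 1][0]
--         # indice_debito = fl - fc; compare via cross-multiplication (m5, m50 > 0)
--         dnum = 100 * c50 * m5 - 100 * c5 * m50
--         dden = m50 * m5
--         if k >= 10:
--             score = -5
--         elif k >= 5:
--             score = 6
--         elif k >= 4:
--             score = 5
--         elif k >= 3 and 100 * c5 >= 80 * m5:
--             score = 4
--         elif k >= 3:
--             score = 3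
--         elif 100 * c5 >= 100 * m5:
--             score = 4
--         elif 100 * c5 >= 80 * m5 and n in recent:
--             score = 3
--         elif dnum < -35 * dden:
--             score = 2
--         elif dnum < -25 * dden:
--             score = 1
--         elif dnum >= 0:
--             score = -2
--         else:
--             score = -1
--         if 100 * c5 > 80 * m5:
--             score += 1
--         scores[n] = score
--     return scores
-- ===== Notes on version B (the rewrite author's own statement) =====
-- stated objective: alternative
-- what changed: Replaces A's two separate frequency-window rebuilds plus 25 per-number rescans of the history (streak loop and recency scan per number) by one forward sweep over the first 50 records that builds both frequency tables, the recent-number set and all 25 consecutive-streak counters at once, and scores with exact integer cross-multiplication instead of float percentages.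
import Mathlib
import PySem

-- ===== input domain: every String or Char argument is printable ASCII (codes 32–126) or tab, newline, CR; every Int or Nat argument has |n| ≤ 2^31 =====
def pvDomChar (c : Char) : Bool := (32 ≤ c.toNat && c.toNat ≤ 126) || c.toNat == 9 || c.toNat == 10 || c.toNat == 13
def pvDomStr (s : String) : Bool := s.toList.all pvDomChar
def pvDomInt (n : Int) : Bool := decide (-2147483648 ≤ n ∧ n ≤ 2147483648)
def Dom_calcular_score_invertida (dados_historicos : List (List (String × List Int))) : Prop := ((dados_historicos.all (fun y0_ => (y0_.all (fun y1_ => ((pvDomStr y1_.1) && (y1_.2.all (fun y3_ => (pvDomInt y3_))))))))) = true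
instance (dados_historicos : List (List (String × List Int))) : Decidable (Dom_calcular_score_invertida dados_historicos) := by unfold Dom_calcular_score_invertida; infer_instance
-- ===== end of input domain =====

-- B replaces A's two frequency-window rebuilds and 25 per-number history rescans by ONE
-- forward sweep over the first 50 records that builds all statistics at once, and scores
-- with exact integer cross-multiplication instead of float percentages (alternative
-- decomposition; the float comparisons agree with the exact ones on every reachable branch).

-- r['numeros'] (both Pythons); total via getD — exact under Pre_ (key present)
def pvNums (r : List (String × List Int)) : List Int :=
  (PySem.Dict.mk r).getD "numeros" []

-- ===== PORT A =====
-- freq.update(r['numeros'])  (Counter.update = the PySem counter fold)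
def pvCounterUpd (f : PySem.Dict Int Int) (nums : List Int) : PySem.Dict Int Int :=
  nums.foldl (fun d x => d.modify x 0 (· + 1)) f

-- def freq_janela(tamanho); the float percentage is ported as ℚ (exact: see header note)
def pvFreqJanela (dados : List (List (String × List Int))) (tamanho : Int) : PySem.Dict Int ℚ :=
  let m : Int := min tamanho (PySem.List.len dados)
  let freq : PySem.Dict Int Int :=
    (PySem.List.slice dados none (some m)).foldl (fun f r => pvCounterUpd f (pvNums r)) PySem.Dict.empty
  (PySem.List.pyRange 1 26 1).foldl
    (fun d n => d.insert n (((freq.getD n 0 : Int) : ℚ) / (m : ℚ) * 100)) PySem.Dict.empty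

-- def contar_consecutivos(n): the loop with break
def pvContar (n : Int) : List (List (String × List Int)) → Int → Int
  | [], count => count
  | r :: rs, count => if (pvNums r).contains n then pvContar n rs (count + 1) else count

def calcular_score_invertida (dados_historicos : List (List (String × List Int))) : List (Int × Int) :=
  let freq_5 := pvFreqJanela dados_historicos 5
  let freq_50 := pvFreqJanela dados_historicos 50
  let FREQ_ESPERADA : ℚ := 60
  let scores : PySem.Dict Int Int :=
    (PySem.List.pyRange 1 26 1).foldl (fun sc n =>
      let fc : ℚ := freq_5.getD n 0
      let fl : ℚ := freq_50.getD n 0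
      let indice_debito : ℚ := fl - fc
      let consecutivos : Int := pvContar n (PySem.List.slice dados_historicos none (some 15)) 0
      let apareceu_recente : Bool :=
        (PySem.List.slice dados_historicos none (some 3)).any (fun r => (pvNums r).contains n)
      let score : Int :=
        if consecutivos ≥ 10 then -5
        else if consecutivos ≥ 5 then 6
        else if consecutivos ≥ 4 then 5
        else if consecutivos ≥ 3 ∧ fc ≥ 80 then 4
        else if consecutivos ≥ 3 then 3
        else if fc ≥ 100 then 4
        else if fc ≥ 80 ∧ apareceu_recente = true then 3
        else if indice_debito < -35 then 2
        else if indice_debito < -25 then 1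
        else if indice_debito ≥ 0 then -2
        else -1
      let score := if fc > FREQ_ESPERADA + 20 then score + 1 else score
      sc.insert n score) PySem.Dict.empty
  scores.items

-- ===== PORT B =====
-- f[x] = f.get(x, 0) + 1
def pvInc (d : PySem.Dict Int Int) (x : Int) : PySem.Dict Int Int := d.insert x (d.getD x 0 + 1)

-- the streak comprehension over enumerate(streaks)
def pvStreakStep (streaks : List (Int × Bool)) (nums : List Int) : List (Int × Bool) :=
  (PySem.List.enumerate streaks).map (fun jp =>
    if jp.2.2 then (if nums.contains (jp.1 + 1) then (jp.2.1 + 1, true) else (jp.2.1, false))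
    else jp.2)

-- one iteration of the sweep body, state (f5, f50, recent, streaks)
def pvSweep (st : PySem.Dict Int Int × PySem.Dict Int Int × PySem.Set Int × List (Int × Bool))
    (ir : Int × List (String × List Int)) :
    PySem.Dict Int Int × PySem.Dict Int Int × PySem.Set Int × List (Int × Bool) :=
  let nums := pvNums ir.2
  let f5 := if ir.1 < 5 then nums.foldl pvInc st.1 else st.1
  let f50 := nums.foldl pvInc st.2.1
  let recent := if ir.1 < 3 then PySem.Set.update st.2.2.1 nums else st.2.2.1
  let streaks := if ir.1 < 15 then pvStreakStep st.2.2.2 nums else st.2.2.2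
  (f5, f50, recent, streaks)

def calcular_score_invertida_alt (dados_historicos : List (List (String × List Int))) : List (Int × Int) :=
  let L : Int := PySem.List.len dados_historicos
  let m5 : Int := min 5 L
  let m50 : Int := min 50 L
  let st :=
    (PySem.List.enumerate (PySem.List.slice dados_historicos none (some 50))).foldl pvSweep
      (PySem.Dict.empty, PySem.Dict.empty, PySem.Set.empty, List.replicate 25 ((0 : Int), true))
  let f5 := st.1
  let f50 := st.2.1
  let recent := st.2.2.1
  let streaks := st.2.2.2
  let scores : PySem.Dict Int Int :=
    (PySem.List.pyRange 1 26 1).foldl (fun sc n =>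
      let c5 : Int := f5.getD n 0
      let c50 : Int := f50.getD n 0
      -- streaks[n - 1][0]: the index is always in range (streaks has 25 entries)
      let k : Int := ((PySem.List.pyGet? streaks (n - 1)).getD (0, true)).1
      let dnum : Int := 100 * c50 * m5 - 100 * c5 * m50
      let dden : Int := m50 * m5
      let score : Int :=
        if k ≥ 10 then -5
        else if k ≥ 5 then 6
        else if k ≥ 4 then 5
        else if k ≥ 3 ∧ 100 * c5 ≥ 80 * m5 then 4
        else if k ≥ 3 then 3
        else if 100 * c5 ≥ 100 * m5 then 4
        else if 100 * c5 ≥ 80 * m5 ∧ recent.contains n = true then 3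
        else if dnum < -35 * dden then 2
        else if dnum < -25 * dden then 1
        else if dnum ≥ 0 then -2
        else -1
      let score := if 100 * c5 > 80 * m5 then score + 1 else score
      sc.insert n score) PySem.Dict.empty
  scores.items

-- ===== PRECONDITION & SPEC =====
-- Pre_ excludes exactly the inputs on which the Python A raises: the empty history
-- (ZeroDivisionError in freq_janela) and histories whose first 50 records lack the
-- 'numeros' key (KeyError); records beyond index 49 are never accessed.
def Pre_calcular_score_invertida (dados_historicos : List (List (String × List Int))) : Prop :=
  dados_historicos ≠ [] ∧
    ∀ r ∈ dados_historicos.take 50, (PySem.Dict.mk r).contains "numeros" = true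
instance (dados_historicos : List (List (String × List Int))) : Decidable (Pre_calcular_score_invertida dados_historicos) := by unfold Pre_calcular_score_invertida; infer_instance

def pvWitness_calcular_score_invertida : (List (List (String × List Int))) :=
  [[("numeros", [1, 2, 3])]]

def Spec_calcular_score_invertida (dados_historicos : List (List (String × List Int))) (out : List (Int × Int)) : Prop := out = calcular_score_invertida_alt dados_historicos
instance (dados_historicos : List (List (String × List Int))) (out : List (Int × Int)) : Decidable (Spec_calcular_score_invertida dados_historicos out) := by unfold Spec_calcular_score_invertida; infer_instance

-- ===== CLAIM (what is proved, stated in full; the proofs are below) =====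
def Claim_equal_calcular_score_invertida : Prop := ∀ (dados_historicos : List (List (String × List Int))), Dom_calcular_score_invertida dados_historicos → Pre_calcular_score_invertida dados_historicos → Spec_calcular_score_invertida dados_historicos (calcular_score_invertida dados_historicos)


-- ===== LEMMAS AND PROOFS =====

-- canonical count of n in the flattened 'numeros' of a record list
def pvCnt (rs : List (List (String × List Int))) (n : Int) : Int :=
  ((rs.map pvNums).flatten.count n : Int)

-- canonical streak length of n over a record list
def pvStreak (n : Int) (rs : List (List (String × List Int))) : Nat :=
  (rs.takeWhile (fun r => (pvNums r).contains n)).length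

-- lookup in a comprehension dict {k: f(k) for k in l}
lemma pv_getD_foldl_insert {v : Type} (f : Int -> v) (l : List Int) (d : PySem.Dict Int v) (n : Int) (d0 : v) :
    (l.foldl (fun d k => d.insert k (f k)) d).getD n d0 = if n ∈ l then f n else d.getD n d0 := by
  induction l generalizing d with
  | nil => simp
  | cons a l ih =>
      simp only [List.foldl_cons, ih, PySem.Dict.getD_insert, List.mem_cons]
      by_cases h1 : n ∈ l <;> by_cases h2 : n = a <;> simp [h1, h2]

-- A's Counter.update chain
lemma pv_countA (rs : List (List (String × List Int))) (d : PySem.Dict Int Int) (n : Int) :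
    (rs.foldl (fun f r => pvCounterUpd f (pvNums r)) d).getD n 0 = d.getD n 0 + pvCnt rs n := by
  induction rs generalizing d with
  | nil => simp [pvCnt]
  | cons r rs ih =>
      rw [List.foldl_cons, ih, show pvCounterUpd d (pvNums r)
          = (pvNums r).foldl (fun d x => d.modify x 0 (· + 1)) d from rfl,
        PySem.Dict.getD_foldl_modify_add_one]
      simp only [pvCnt, List.map_cons, List.flatten_cons, List.count_append]
      push_cast; ring

-- B's f[x] = f.get(x,0)+1 chain
lemma pv_countB (rs : List (List (String × List Int))) (d : PySem.Dict Int Int) (n : Int) :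
    (rs.foldl (fun f r => (pvNums r).foldl pvInc f) d).getD n 0 = d.getD n 0 + pvCnt rs n := by
  induction rs generalizing d with
  | nil => simp [pvCnt]
  | cons r rs ih =>
      rw [List.foldl_cons, ih, show (pvNums r).foldl pvInc d
          = (pvNums r).foldl (fun d x => d.insert x (d.getD x 0 + 1)) d from rfl,
        PySem.Dict.getD_foldl_insert_add_one]
      simp only [pvCnt, List.map_cons, List.flatten_cons, List.count_append]
      push_cast; ring

-- the four projections of the sweep fold
lemma pv_sweep_f5 (rs : List (List (String × List Int))) (s : Nat)
    (st : PySem.Dict Int Int × PySem.Dict Int Int × PySem.Set Int × List (Int × Bool)) :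
    ((PySem.List.enumerate rs (s : Int)).foldl pvSweep st).1
      = (rs.take (5 - s)).foldl (fun f r => (pvNums r).foldl pvInc f) st.1 := by
  induction rs generalizing s st with
  | nil => simp [PySem.List.enumerate_nil]
  | cons r rs ih =>
      rw [PySem.List.enumerate_cons, List.foldl_cons,
        show (s : Int) + 1 = ((s + 1 : Nat) : Int) by push_cast; ring, ih]
      by_cases h : s < 5
      · have h5 : 5 - s = (5 - (s + 1)) + 1 := by omega
        rw [h5, List.take_succ_cons, List.foldl_cons]
        have : ((s : Int) < 5) := by exact_mod_cast h
        simp [pvSweep, this]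
      · have h5 : 5 - s = 0 := by omega
        have h5' : 5 - (s + 1) = 0 := by omega
        have : ¬ ((s : Int) < 5) := by exact_mod_cast h
        simp [h5, h5', pvSweep, this]

lemma pv_sweep_f50 (rs : List (List (String × List Int))) (s : Int)
    (st : PySem.Dict Int Int × PySem.Dict Int Int × PySem.Set Int × List (Int × Bool)) :
    ((PySem.List.enumerate rs s).foldl pvSweep st).2.1
      = rs.foldl (fun f r => (pvNums r).foldl pvInc f) st.2.1 := by
  induction rs generalizing s st with
  | nil => simp [PySem.List.enumerate_nil]
  | cons r rs ih =>
      rw [PySem.List.enumerate_cons, List.foldl_cons, List.foldl_cons, ih]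
      simp [pvSweep]

lemma pv_sweep_recent (rs : List (List (String × List Int))) (s : Nat)
    (st : PySem.Dict Int Int × PySem.Dict Int Int × PySem.Set Int × List (Int × Bool)) :
    ((PySem.List.enumerate rs (s : Int)).foldl pvSweep st).2.2.1
      = (rs.take (3 - s)).foldl (fun re r => PySem.Set.update re (pvNums r)) st.2.2.1 := by
  induction rs generalizing s st with
  | nil => simp [PySem.List.enumerate_nil]
  | cons r rs ih =>
      rw [PySem.List.enumerate_cons, List.foldl_cons,
        show (s : Int) + 1 = ((s + 1 : Nat) : Int) by push_cast; ring, ih]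
      by_cases h : s < 3
      · have h3 : 3 - s = (3 - (s + 1)) + 1 := by omega
        rw [h3, List.take_succ_cons, List.foldl_cons]
        have : ((s : Int) < 3) := by exact_mod_cast h
        simp [pvSweep, this]
      · have h3 : 3 - s = 0 := by omega
        have h3' : 3 - (s + 1) = 0 := by omega
        have : ¬ ((s : Int) < 3) := by exact_mod_cast h
        simp [h3, h3', pvSweep, this]

lemma pv_sweep_streaks (rs : List (List (String × List Int))) (s : Nat)
    (st : PySem.Dict Int Int × PySem.Dict Int Int × PySem.Set Int × List (Int × Bool)) :
    ((PySem.List.enumerate rs (s : Int)).foldl pvSweep st).2.2.2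
      = (rs.take (15 - s)).foldl (fun t r => pvStreakStep t (pvNums r)) st.2.2.2 := by
  induction rs generalizing s st with
  | nil => simp [PySem.List.enumerate_nil]
  | cons r rs ih =>
      rw [PySem.List.enumerate_cons, List.foldl_cons,
        show (s : Int) + 1 = ((s + 1 : Nat) : Int) by push_cast; ring, ih]
      by_cases h : s < 15
      · have h15 : 15 - s = (15 - (s + 1)) + 1 := by omega
        rw [h15, List.take_succ_cons, List.foldl_cons]
        have : ((s : Int) < 15) := by exact_mod_cast h
        simp [pvSweep, this]
      · have h15 : 15 - s = 0 := by omega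
        have h15' : 15 - (s + 1) = 0 := by omega
        have : ¬ ((s : Int) < 15) := by exact_mod_cast h
        simp [h15, h15', pvSweep, this]

-- element j of the streak fold
lemma pv_streak_get (L : List (List (String × List Int))) :
    ∀ (st : List (Int × Bool)) (j : Nat) (cb : Int × Bool), st[j]? = some cb →
      (L.foldl (fun t r => pvStreakStep t (pvNums r)) st)[j]?
        = some (if cb.2 then (cb.1 + (pvStreak ((j : Int) + 1) L : Int),
                              L.all (fun r => (pvNums r).contains ((j : Int) + 1)))
                else cb) := by
  induction L with
  | nil =>
      intro st j cb h
      obtain ⟨c, b⟩ := cb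
      cases b <;> simp [h, pvStreak]
  | cons r L ih =>
      intro st j cb h
      have hj : j < st.length := by
        by_contra hc
        simp [List.getElem?_eq_none (by omega : st.length ≤ j)] at h
      have hstep : (pvStreakStep st (pvNums r))[j]? = some
          (if cb.2 then (if (pvNums r).contains ((j:Int) + 1) then (cb.1 + 1, true) else (cb.1, false))
           else cb) := by
        simp only [pvStreakStep, List.getElem?_map, PySem.List.getElem?_enumerate, h,
          Option.map_some]
        simp
      rw [List.foldl_cons, ih _ j _ hstep]
      obtain ⟨c, b⟩ := cb
      cases b with
      | false => simp [pvStreak]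
      | true =>
          by_cases hc : ((j : Int) + 1) ∈ pvNums r
          · simp [hc, pvStreak, Prod.ext_iff]
            omega
          · simp [hc, pvStreak]

-- A's break loop is the streak length
lemma pv_contar_eq (n : Int) (L : List (List (String × List Int))) (c : Int) :
    pvContar n L c = c + (pvStreak n L : Int) := by
  induction L generalizing c with
  | nil => simp [pvContar, pvStreak]
  | cons r L ih =>
      by_cases h : n ∈ pvNums r
      · simp [pvContar, h, ih, pvStreak]
        omega
      · simp [pvContar, h, pvStreak]

-- B's recent set membership is A's any-over-take-3
lemma pv_recent_contains (rs : List (List (String × List Int))) (s : PySem.Set Int) (n : Int) :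
    (rs.foldl (fun re r => PySem.Set.update re (pvNums r)) s).contains n
      = (s.contains n || rs.any (fun r => (pvNums r).contains n)) := by
  induction rs generalizing s with
  | nil => simp
  | cons r rs ih =>
      simp only [List.foldl_cons, ih, List.any_cons]
      have h1 : (PySem.Set.update s (pvNums r)).contains n
          = (s.contains n || (pvNums r).contains n) := by
        simp only [PySem.Set.contains_eq_listContains, List.contains_eq_mem,
          PySem.Set.mem_update, Bool.decide_or]
      rw [h1, Bool.or_assoc]

-- arithmetic bridges: the ported exact-ℚ comparisons vs B's cross-multiplied Int ones
lemma pv_core_ge (a c m : Int) (hm : 0 < m) :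
    ((c : ℚ) / (m : ℚ) * 100 ≥ (a : ℚ)) ↔ 100 * c ≥ a * m := by
  rw [ge_iff_le, div_mul_eq_mul_div, le_div_iff₀ (by exact_mod_cast hm)]
  rw [show (c : ℚ) * 100 = ((100 * c : Int) : ℚ) by push_cast; ring,
    show (a : ℚ) * (m : ℚ) = ((a * m : Int) : ℚ) by push_cast; ring]
  exact_mod_cast Iff.rfl

lemma pv_core_gt (a c m : Int) (hm : 0 < m) :
    ((c : ℚ) / (m : ℚ) * 100 > (a : ℚ)) ↔ 100 * c > a * m := by
  rw [gt_iff_lt, div_mul_eq_mul_div, lt_div_iff₀ (by exact_mod_cast hm)]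
  rw [show (c : ℚ) * 100 = ((100 * c : Int) : ℚ) by push_cast; ring,
    show (a : ℚ) * (m : ℚ) = ((a * m : Int) : ℚ) by push_cast; ring]
  exact_mod_cast Iff.rfl

lemma pv_core_d_repr (c50 c5 m50 m5 : Int) (h50 : (m50 : ℚ) ≠ 0) (h5 : (m5 : ℚ) ≠ 0) :
    (c50 : ℚ) / (m50 : ℚ) * 100 - (c5 : ℚ) / (m5 : ℚ) * 100
      = ((100 * c50 * m5 - 100 * c5 * m50 : Int) : ℚ) / ((m50 * m5 : Int) : ℚ) := by
  push_cast
  field_simp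

lemma pv_core_d_lt (a c50 c5 m50 m5 : Int) (h50 : 0 < m50) (h5 : 0 < m5) :
    ((c50 : ℚ) / (m50 : ℚ) * 100 - (c5 : ℚ) / (m5 : ℚ) * 100 < (a : ℚ))
      ↔ 100 * c50 * m5 - 100 * c5 * m50 < a * (m50 * m5) := by
  rw [pv_core_d_repr _ _ _ _ (by positivity) (by positivity),
    div_lt_iff₀ (by exact_mod_cast Int.mul_pos h50 h5)]
  rw [show (a : ℚ) * ((m50 * m5 : Int) : ℚ) = ((a * (m50 * m5) : Int) : ℚ) by push_cast; ring]
  exact_mod_cast Iff.rfl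

lemma pv_core_d_ge (c50 c5 m50 m5 : Int) (h50 : 0 < m50) (h5 : 0 < m5) :
    ((c50 : ℚ) / (m50 : ℚ) * 100 - (c5 : ℚ) / (m5 : ℚ) * 100 ≥ 0)
      ↔ 100 * c50 * m5 - 100 * c5 * m50 ≥ 0 := by
  rw [ge_iff_le, pv_core_d_repr _ _ _ _ (by positivity) (by positivity),
    le_div_iff₀ (by exact_mod_cast Int.mul_pos h50 h5)]
  rw [zero_mul]
  exact_mod_cast Iff.rfl



-- take up to min(t, len) is take t
lemma pv_take_min (k : Int) (hk : 0 ≤ k) (dados : List (List (String × List Int))) :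
    dados.take ((min k (PySem.List.len dados)).toNat) = dados.take k.toNat := by
  have h : (min k (PySem.List.len dados)).toNat = min k.toNat dados.length := by
    simp only [PySem.List.len]; omega
  rw [h]
  rcases le_total k.toNat dados.length with h1 | h1
  · rw [Nat.min_eq_left h1]
  · rw [Nat.min_eq_right h1, List.take_length, List.take_of_length_le h1]

-- freq_janela(t) looked up at n ∈ 1..25
lemma pv_freqJanela_getD (dados : List (List (String × List Int))) (t : Int) (ht : 0 ≤ t)
    (n : Int) (hn1 : 1 ≤ n) (hn2 : n < 26) :
    (pvFreqJanela dados t).getD n 0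
      = ((pvCnt (dados.take t.toNat) n : Int) : ℚ)
          / ((min t (PySem.List.len dados) : Int) : ℚ) * 100 := by
  have hmn : (0 : Int) ≤ min t (PySem.List.len dados) := by
    simp only [PySem.List.len]; omega
  simp only [pvFreqJanela]
  rw [pv_getD_foldl_insert, if_pos (PySem.List.mem_pyRange_one.mpr ⟨hn1, hn2⟩),
    PySem.List.slice_to dados hmn, pv_take_min t ht dados, pv_countA]
  simp

lemma pv_freq5_getD (dados : List (List (String × List Int))) (n : Int)
    (hn1 : 1 ≤ n) (hn2 : n < 26) :
    (pvFreqJanela dados 5).getD n 0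
      = ((pvCnt (dados.take 5) n : Int) : ℚ)
          / ((min (5 : Int) (PySem.List.len dados) : Int) : ℚ) * 100 :=
  pv_freqJanela_getD dados 5 (by norm_num) n hn1 hn2

lemma pv_freq50_getD (dados : List (List (String × List Int))) (n : Int)
    (hn1 : 1 ≤ n) (hn2 : n < 26) :
    (pvFreqJanela dados 50).getD n 0
      = ((pvCnt (dados.take 50) n : Int) : ℚ)
          / ((min (50 : Int) (PySem.List.len dados) : Int) : ℚ) * 100 :=
  pv_freqJanela_getD dados 50 (by norm_num) n hn1 hn2

lemma pv_ge80 (c m : Int) (hm : 0 < m) :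
    ((c : ℚ) / (m : ℚ) * 100 ≥ 80) ↔ 100 * c ≥ 80 * m := by
  have h := pv_core_ge 80 c m hm
  rw [show ((80 : Int) : ℚ) = (80 : ℚ) by norm_num] at h
  exact h

lemma pv_ge100 (c m : Int) (hm : 0 < m) :
    ((c : ℚ) / (m : ℚ) * 100 ≥ 100) ↔ 100 * c ≥ 100 * m := by
  have h := pv_core_ge 100 c m hm
  rw [show ((100 : Int) : ℚ) = (100 : ℚ) by norm_num] at h
  exact h

lemma pv_gt80 (c m : Int) (hm : 0 < m) :
    ((c : ℚ) / (m : ℚ) * 100 > 60 + 20) ↔ 100 * c > 80 * m := by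
  have h := pv_core_gt 80 c m hm
  rw [show ((80 : Int) : ℚ) = (80 : ℚ) by norm_num] at h
  rw [show (60 : ℚ) + 20 = 80 by norm_num]
  exact h

lemma pv_d_lt35 (c50 c5 m50 m5 : Int) (h50 : 0 < m50) (h5 : 0 < m5) :
    ((c50 : ℚ) / (m50 : ℚ) * 100 - (c5 : ℚ) / (m5 : ℚ) * 100 < -35)
      ↔ 100 * c50 * m5 - 100 * c5 * m50 < -35 * (m50 * m5) := by
  have h := pv_core_d_lt (-35) c50 c5 m50 m5 h50 h5
  rw [show (((-35 : Int)) : ℚ) = (-35 : ℚ) by norm_num] at h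
  exact h

lemma pv_d_lt25 (c50 c5 m50 m5 : Int) (h50 : 0 < m50) (h5 : 0 < m5) :
    ((c50 : ℚ) / (m50 : ℚ) * 100 - (c5 : ℚ) / (m5 : ℚ) * 100 < -25)
      ↔ 100 * c50 * m5 - 100 * c5 * m50 < -25 * (m50 * m5) := by
  have h := pv_core_d_lt (-25) c50 c5 m50 m5 h50 h5
  rw [show (((-25 : Int)) : ℚ) = (-25 : ℚ) by norm_num] at h
  exact h

-- ===== VERDICT (by name: the statement is the Claim_ definition above) =====
theorem calcular_score_invertida_spec : Claim_equal_calcular_score_invertida := by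
  intro dados hdom hpre
  unfold Spec_calcular_score_invertida
  obtain ⟨hne, -⟩ := hpre
  have hlen : 0 < dados.length := List.length_pos_iff.mpr hne
  have hm5 : 0 < min (5 : Int) (PySem.List.len dados) := by
    simp only [PySem.List.len]; omega
  have hm50 : 0 < min (50 : Int) (PySem.List.len dados) := by
    simp only [PySem.List.len]; omega
  have hs15 : PySem.List.slice dados none (some (15 : Int)) = dados.take 15 := by
    rw [PySem.List.slice_to dados (by norm_num : (0:Int) ≤ 15)]
    rfl
  have hs3 : PySem.List.slice dados none (some (3 : Int)) = dados.take 3 := by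
    rw [PySem.List.slice_to dados (by norm_num : (0:Int) ≤ 3)]
    rfl
  have hs50 : PySem.List.slice dados none (some (50 : Int)) = dados.take 50 := by
    rw [PySem.List.slice_to dados (by norm_num : (0:Int) ≤ 50)]
    rfl
  simp only [calcular_score_invertida, calcular_score_invertida_alt, hs15, hs3, hs50]
  apply congrArg PySem.Dict.items
  apply PySem.List.foldl_congr_mem
  intro sc n hn
  obtain ⟨hn1, hn2⟩ := PySem.List.mem_pyRange_one.mp hn
  -- B sweep components
  have hB5 := pv_sweep_f5 (dados.take 50) 0
    (PySem.Dict.empty, PySem.Dict.empty, PySem.Set.empty, List.replicate 25 ((0 : Int), true))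
  have hB50 := pv_sweep_f50 (dados.take 50) 0
    (PySem.Dict.empty, PySem.Dict.empty, PySem.Set.empty, List.replicate 25 ((0 : Int), true))
  have hBrec := pv_sweep_recent (dados.take 50) 0
    (PySem.Dict.empty, PySem.Dict.empty, PySem.Set.empty, List.replicate 25 ((0 : Int), true))
  have hBstr := pv_sweep_streaks (dados.take 50) 0
    (PySem.Dict.empty, PySem.Dict.empty, PySem.Set.empty, List.replicate 25 ((0 : Int), true))
  simp only [Nat.cast_zero, Nat.sub_zero] at hB5 hBrec hBstr
  have ht5 : (dados.take 50).take 5 = dados.take 5 := by rw [List.take_take]; norm_num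
  have ht3 : (dados.take 50).take 3 = dados.take 3 := by rw [List.take_take]; norm_num
  have ht15 : (dados.take 50).take 15 = dados.take 15 := by rw [List.take_take]; norm_num
  rw [hB5, hB50, hBrec, hBstr, ht5, ht3, ht15]
  -- counts
  rw [pv_countB (dados.take 5), pv_countB (dados.take 50)]
  -- streaks element: B's indexed lookup equals A's break loop
  have hjlt : (n - 1).toNat < 25 := by omega
  have hget : (List.replicate 25 ((0 : Int), true))[(n - 1).toNat]? = some ((0 : Int), true) := by
    rw [List.getElem?_replicate, if_pos hjlt]
  have hstr := pv_streak_get (dados.take 15) (List.replicate 25 ((0 : Int), true))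
    (n - 1).toNat ((0 : Int), true) hget
  have hcast : (((n - 1).toNat : Int) + 1) = n := by omega
  have hk : ((PySem.List.pyGet?
      ((dados.take 15).foldl (fun t r => pvStreakStep t (pvNums r))
        (List.replicate 25 ((0 : Int), true))) (n - 1)).getD ((0 : Int), true)).1
      = (0 : Int) + (pvStreak n (dados.take 15) : Int) := by
    rw [PySem.List.pyGet?_of_nonneg _ (by omega : (0 : Int) ≤ n - 1), hstr, hcast]
    rfl
  rw [hk, pv_contar_eq]
  -- frequencies
  rw [pv_freq5_getD dados n hn1 hn2, pv_freq50_getD dados n hn1 hn2]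
  -- recent set
  rw [pv_recent_contains (dados.take 3) PySem.Set.empty n,
    show (PySem.Set.empty.contains n
        || (dados.take 3).any (fun r => (pvNums r).contains n))
      = (dados.take 3).any (fun r => (pvNums r).contains n) from by
        simp [PySem.Set.empty, PySem.Set.contains_eq_listContains]]
  -- clean the zero accumulators on both sides
  simp only [PySem.Dict.getD_empty, zero_add]
  -- comparisons: exact-ℚ vs cross-multiplied Int
  simp only [pv_ge80 _ _ hm5, pv_ge100 _ _ hm5, pv_gt80 _ _ hm5,
    pv_d_lt35 _ _ _ _ hm50 hm5, pv_d_lt25 _ _ _ _ hm50 hm5,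
    pv_core_d_ge _ _ _ _ hm50 hm5]
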